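-- pv_equiv track=rewrite | github.com/mkschulz9/go-playing-agent | go_agent/heuristics/evaluate_move.py | influence_score
-- ===== SOURCE A (Python) =====
-- def influence_score(board, row, col):
--     score = 0
--
--     for dx in [-1, 0, 1]:
--         for dy in [-1, 0, 1]:
--             new_row, new_col = row + dx, col + dy
--             if 0 <= new_row < 5 and 0 <= new_col < 5 and board[new_row][new_col] == 0:
--                 score += 1
--
--     return score
-- ===== SOURCE B (Python) =====
-- def influence_score(board, row, col):
--     score = 0
--     for r, vals in enumerate(board):
--         for c, v in enumerate(vals):
--             if r < 5 and row - 1 <= r <= row + 1 and c < 5 and col - 1 <= c <= col + 1 and v == 0: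
--                 score += 1
--     return score
-- ===== Notes on version B (the rewrite author's own statement) =====
-- stated objective: alternative
-- what changed: Replaces the 9-offset loop with per-offset bounds checks and board indexing by a single enumerate scan of the whole board that counts cells whose (row,col) index lies in the window [row-1,row+1]x[col-1,col+1] clipped to [0,5), with no indexing at all.
import Mathlib
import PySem

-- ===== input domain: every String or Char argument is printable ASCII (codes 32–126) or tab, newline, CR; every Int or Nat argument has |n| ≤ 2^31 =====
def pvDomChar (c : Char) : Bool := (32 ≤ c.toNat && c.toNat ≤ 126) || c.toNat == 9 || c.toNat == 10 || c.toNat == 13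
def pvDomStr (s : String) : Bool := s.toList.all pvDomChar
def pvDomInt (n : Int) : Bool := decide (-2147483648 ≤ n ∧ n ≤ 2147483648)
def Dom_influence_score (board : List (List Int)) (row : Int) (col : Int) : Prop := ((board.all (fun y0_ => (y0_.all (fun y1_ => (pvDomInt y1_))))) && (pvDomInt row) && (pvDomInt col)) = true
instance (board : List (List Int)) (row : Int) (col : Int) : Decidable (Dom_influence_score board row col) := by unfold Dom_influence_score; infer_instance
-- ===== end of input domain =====

-- B replaces A's 9-offset loop with indexed probes by one enumerate scan of the whole
-- board counting cells whose index lies in the clipped 3x3 window (alternative decomposition, no indexing).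


-- shared cell lookup: board[r][c] as an Option (none = Python IndexError, excluded by Pre_)
def pvCell (board : List (List Int)) (r c : Int) : Option Int :=
  (PySem.List.pyGet? board r).bind (fun rowL => PySem.List.pyGet? rowL c)

-- ===== PORT A =====
def influence_score (board : List (List Int)) (row : Int) (col : Int) : Int :=
  [(-1 : Int), 0, 1].foldl (fun score dx =>
    [(-1 : Int), 0, 1].foldl (fun score dy =>
      let new_row := row + dx
      let new_col := col + dy
      if (0 ≤ new_row ∧ new_row < 5 ∧ 0 ≤ new_col ∧ new_col < 5) ∧
         pvCell board new_row new_col = some 0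
      then score + 1 else score) score) 0

-- ===== PORT B =====
def influence_score_alt (board : List (List Int)) (row : Int) (col : Int) : Int :=
  (PySem.List.enumerate board 0).foldl (fun score rv =>
    (PySem.List.enumerate rv.2 0).foldl (fun score cv =>
      if rv.1 < 5 ∧ row - 1 ≤ rv.1 ∧ rv.1 ≤ row + 1 ∧
         cv.1 < 5 ∧ col - 1 ≤ cv.1 ∧ cv.1 ≤ col + 1 ∧ cv.2 = 0
      then score + 1 else score) score) 0

-- ===== PRECONDITION & SPEC =====
-- Pre_ excludes exactly the inputs on which Python A raises IndexError: a neighbour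
-- index inside [0,5)×[0,5) that is out of range for the actual (possibly smaller) board.
def Pre_influence_score (board : List (List Int)) (row : Int) (col : Int) : Prop :=
  ∀ dx ∈ [(-1 : Int), 0, 1], ∀ dy ∈ [(-1 : Int), 0, 1],
    (0 ≤ row + dx ∧ row + dx < 5 ∧ 0 ≤ col + dy ∧ col + dy < 5) →
      (pvCell board (row + dx) (col + dy)).isSome = true
instance (board : List (List Int)) (row : Int) (col : Int) : Decidable (Pre_influence_score board row col) := by unfold Pre_influence_score; infer_instance

def pvWitness_influence_score : List (List Int) × Int × Int :=
  ([[0, 1, 0, 1, 0], [1, 0, 1, 0, 1], [0, 0, 0, 1, 1], [1, 1, 0, 0, 0], [0, 1, 1, 0, 0]], 2, 3)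

def Spec_influence_score (board : List (List Int)) (row : Int) (col : Int) (out : Int) : Prop := out = influence_score_alt board row col
instance (board : List (List Int)) (row : Int) (col : Int) (out : Int) : Decidable (Spec_influence_score board row col out) := by unfold Spec_influence_score; infer_instance

-- ===== CLAIM (what is proved, stated in full; the proofs are below) =====
def Claim_equal_influence_score : Prop := ∀ (board : List (List Int)) (row : Int) (col : Int), Dom_influence_score board row col → Pre_influence_score board row col → Spec_influence_score board row col (influence_score board row col)

-- ===== LEMMAS AND PROOFS =====

-- indicator of A's single probe at (t, u)
def pvI (board : List (List Int)) (t u : Int) : Int :=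
  if (0 ≤ t ∧ t < 5 ∧ 0 ≤ u ∧ u < 5) ∧ pvCell board t u = some 0 then 1 else 0

-- indicator "entry u-s of vals (i.e. absolute column u when scanning from start s) is an in-window zero"
def pvU (vals : List Int) (s u : Int) : Int :=
  if s ≤ u ∧ u < 5 ∧ PySem.List.pyGet? vals (u - s) = some 0 then 1 else 0

-- per-row window sum (columns col-1, col, col+1)
def pvU3 (vals : List Int) (col : Int) : Int :=
  pvU vals 0 (col - 1) + pvU vals 0 col + pvU vals 0 (col + 1)

-- contribution of absolute row t when scanning rows from start s
def pvV (board : List (List Int)) (col : Int) (s t : Int) : Int :=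
  if s ≤ t ∧ t < 5 then
    (match PySem.List.pyGet? board (t - s) with
     | some vals => pvU3 vals col
     | none => 0)
  else 0

theorem pvU_cons (v : Int) (rest : List Int) (s u : Int) (hs : 0 ≤ s) :
    pvU (v :: rest) s u = (if s = u ∧ u < 5 ∧ v = 0 then 1 else 0) + pvU rest (s + 1) u := by
  unfold pvU
  by_cases h : s ≤ u
  · by_cases he : u = s
    · subst he
      rw [show u - u = (0 : Int) by ring, PySem.List.pyGet?_zero_cons]
      have h2 : ¬ (u + 1 ≤ u) := by omega
      split_ifs <;> simp_all
    · have h1 : s + 1 ≤ u := by omega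
      have hn : (0:Int) ≤ u - (s + 1) := by omega
      have e1 : PySem.List.pyGet? (v :: rest) (u - s) = rest[(u - (s+1)).toNat]? := by
        rw [PySem.List.pyGet?_of_nonneg _ (by omega)]
        have : (u - s).toNat = (u - (s+1)).toNat + 1 := by omega
        rw [this, List.getElem?_cons_succ]
      rw [e1, PySem.List.pyGet?_of_nonneg _ hn]
      have h2 : ¬ (s = u) := by omega
      split_ifs <;> simp_all
  · have h1 : ¬ (s = u) := by omega
    have h2 : ¬ (s + 1 ≤ u) := by omega
    split_ifs <;> simp_all

theorem pvInnerAux (row col r : Int) (vals : List Int) :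
    ∀ (s acc : Int), 0 ≤ s →
    (PySem.List.enumerate vals s).foldl (fun score cv =>
      if r < 5 ∧ row - 1 ≤ r ∧ r ≤ row + 1 ∧
         cv.1 < 5 ∧ col - 1 ≤ cv.1 ∧ cv.1 ≤ col + 1 ∧ cv.2 = 0
      then score + 1 else score) acc
    = acc + (if r < 5 ∧ row - 1 ≤ r ∧ r ≤ row + 1 then
        pvU vals s (col - 1) + pvU vals s col + pvU vals s (col + 1) else 0) := by
  induction vals with
  | nil =>
    intro s acc hs
    simp [PySem.List.enumerate_nil, pvU, PySem.List.pyGet?]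
  | cons v rest ih =>
    intro s acc hs
    rw [PySem.List.enumerate_cons, List.foldl_cons, ih (s + 1) _ (by omega)]
    rw [pvU_cons v rest s (col - 1) hs, pvU_cons v rest s col hs, pvU_cons v rest s (col + 1) hs]
    generalize pvU rest (s + 1) (col - 1) = A1
    generalize pvU rest (s + 1) col = A2
    generalize pvU rest (s + 1) (col + 1) = A3
    split_ifs <;> omega

theorem pvV_cons (vals : List Int) (rest : List (List Int)) (col s t : Int) (hs : 0 ≤ s) :
    pvV (vals :: rest) col s t
    = (if s = t ∧ t < 5 then pvU3 vals col else 0) + pvV rest col (s + 1) t := by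
  unfold pvV
  by_cases h : s ≤ t
  · by_cases he : t = s
    · subst he
      rw [show t - t = (0 : Int) by ring, PySem.List.pyGet?_zero_cons]
      have h2 : ¬ (t + 1 ≤ t) := by omega
      split_ifs <;> simp_all
    · have h1 : s + 1 ≤ t := by omega
      have e1 : PySem.List.pyGet? (vals :: rest) (t - s) = PySem.List.pyGet? rest (t - (s + 1)) := by
        rw [PySem.List.pyGet?_of_nonneg _ (by omega), PySem.List.pyGet?_of_nonneg _ (by omega : (0:Int) ≤ t - (s+1))]
        have : (t - s).toNat = (t - (s+1)).toNat + 1 := by omega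
        rw [this, List.getElem?_cons_succ]
      rw [e1]
      have h2 : ¬ (s = t) := by omega
      split_ifs <;> simp_all
  · have h1 : ¬ (s = t) := by omega
    have h2 : ¬ (s + 1 ≤ t) := by omega
    split_ifs <;> simp_all

theorem pvOuterAux (row col : Int) (board : List (List Int)) :
    ∀ (s acc : Int), 0 ≤ s →
    (PySem.List.enumerate board s).foldl (fun score rv =>
      (PySem.List.enumerate rv.2 0).foldl (fun score cv =>
        if rv.1 < 5 ∧ row - 1 ≤ rv.1 ∧ rv.1 ≤ row + 1 ∧
           cv.1 < 5 ∧ col - 1 ≤ cv.1 ∧ cv.1 ≤ col + 1 ∧ cv.2 = 0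
        then score + 1 else score) score) acc
    = acc + (pvV board col s (row - 1) + pvV board col s row + pvV board col s (row + 1)) := by
  induction board with
  | nil =>
    intro s acc hs
    simp [PySem.List.enumerate_nil, pvV, PySem.List.pyGet?]
  | cons vals rest ih =>
    intro s acc hs
    rw [PySem.List.enumerate_cons, List.foldl_cons,
        pvInnerAux row col s vals 0 acc (by omega), ih (s + 1) _ (by omega)]
    rw [pvV_cons vals rest col s (row - 1) hs, pvV_cons vals rest col s row hs,
        pvV_cons vals rest col s (row + 1) hs]
    have hU3 : (if s < 5 ∧ row - 1 ≤ s ∧ s ≤ row + 1 then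
        pvU vals 0 (col - 1) + pvU vals 0 col + pvU vals 0 (col + 1) else 0)
        = (if s < 5 ∧ row - 1 ≤ s ∧ s ≤ row + 1 then pvU3 vals col else 0) := by
      unfold pvU3; rfl
    rw [hU3]
    generalize pvU3 vals col = A0
    generalize pvV rest col (s + 1) (row - 1) = A1
    generalize pvV rest col (s + 1) row = A2
    generalize pvV rest col (s + 1) (row + 1) = A3
    split_ifs <;> omega

-- A as the sum of its nine probes
theorem pvAddIf (C : Prop) [Decidable C] (x : Int) :
    (if C then x + 1 else x) = x + (if C then 1 else 0) := by
  split_ifs <;> ring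

theorem pvA_eq (board : List (List Int)) (row col : Int) :
    influence_score board row col
    = pvI board (row - 1) (col - 1) + pvI board (row - 1) col + pvI board (row - 1) (col + 1)
    + pvI board row (col - 1) + pvI board row col + pvI board row (col + 1)
    + pvI board (row + 1) (col - 1) + pvI board (row + 1) col + pvI board (row + 1) (col + 1) := by
  simp only [influence_score, List.foldl_cons, List.foldl_nil, pvAddIf, pvI,
             show ∀ x : Int, x + -1 = x - 1 from fun x => by ring,
             show ∀ x : Int, x + 0 = x from fun x => by ring]
  ring

-- one row of probes equals that row's window contribution
set_option maxHeartbeats 2000000 in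
theorem pvRowsum (board : List (List Int)) (col t : Int) :
    pvI board t (col - 1) + pvI board t col + pvI board t (col + 1) = pvV board col 0 t := by
  unfold pvI pvV pvU3 pvU pvCell
  rw [show t - 0 = t by ring, show col - 1 - 0 = col - 1 by ring, show col - 0 = col by ring,
      show col + 1 - 0 = col + 1 by ring]
  cases h : PySem.List.pyGet? board t with
  | none => simp
  | some vals =>
    simp only [Option.bind]
    split_ifs <;> first | rfl | omega | tauto

theorem pvB_eq (board : List (List Int)) (row col : Int) :
    influence_score_alt board row col
    = pvV board col 0 (row - 1) + pvV board col 0 row + pvV board col 0 (row + 1) := by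
  unfold influence_score_alt
  rw [pvOuterAux row col board 0 0 (by omega)]
  ring

-- ===== VERDICT (by name: the statement is the Claim_ definition above) =====
theorem influence_score_spec : Claim_equal_influence_score := by
  intro board row col _ _
  unfold Spec_influence_score
  rw [pvA_eq, pvB_eq, ← pvRowsum board col (row - 1), ← pvRowsum board col row,
      ← pvRowsum board col (row + 1)]
  ring
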